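-- pv_equiv track=rewrite | github.com/pikelelalikho/content.app | app.py | generate_form_fields
-- ===== SOURCE A (Python) =====
-- def generate_form_fields(prompt):
--     """Generate form fields based on prompt"""
--     fields = []
--     prompt_lower = prompt.lower()
--
--     if any(word in prompt_lower for word in ['name', 'contact']):
--         fields.append('''
--         <div class="form-group">
--             <label for="name">Name:</label>
--             <input type="text" id="name" name="name" required>
--         </div>''')
--
--     if any(word in prompt_lower for word in ['email', 'contact']):
--         fields.append('''
--         <div class="form-group">
--             <label for="email">Email:</label>
--             <input type="email" id="email" name="email" required>
--         </div>''')
--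
--     if any(word in prompt_lower for word in ['phone', 'contact']):
--         fields.append('''
--         <div class="form-group">
--             <label for="phone">Phone:</label>
--             <input type="tel" id="phone" name="phone">
--         </div>''')
--
--     if any(word in prompt_lower for word in ['message', 'comment']):
--         fields.append('''
--         <div class="form-group">
--             <label for="message">Message:</label>
--             <textarea id="message" name="message" rows="4"></textarea>
--         </div>''')
--
--     if any(word in prompt_lower for word in ['password', 'login', 'signup']):
--         fields.append('''
--         <div class="form-group">
--             <label for="password">Password:</label>
--             <input type="password" id="password" name="password" required>
--         </div>''')
--
--     # Default fields if none specified
--     if not fields: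
--         fields = [
--             '''
--         <div class="form-group">
--             <label for="name">Name:</label>
--             <input type="text" id="name" name="name" required>
--         </div>''',
--             '''
--         <div class="form-group">
--             <label for="email">Email:</label>
--             <input type="email" id="email" name="email" required>
--         </div>'''
--         ]
--
--     return ''.join(fields)
-- ===== SOURCE B (Python) =====
-- SNIPPETS = [
--     '''
--         <div class="form-group">
--             <label for="name">Name:</label>
--             <input type="text" id="name" name="name" required>
--         </div>''',
--     '''
--         <div class="form-group">
--             <label for="email">Email:</label>
--             <input type="email" id="email" name="email" required>
--         </div>''',
--     '''
--         <div class="form-group">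
--             <label for="phone">Phone:</label>
--             <input type="tel" id="phone" name="phone">
--         </div>''',
--     '''
--         <div class="form-group">
--             <label for="message">Message:</label>
--             <textarea id="message" name="message" rows="4"></textarea>
--         </div>''',
--     '''
--         <div class="form-group">
--             <label for="password">Password:</label>
--             <input type="password" id="password" name="password" required>
--         </div>''',
-- ]
--
-- # inverted index: keyword -> indices of the snippets it triggers
-- KEYWORD_FIELDS = {
--     'name': [0],
--     'email': [1],
--     'phone': [2],
--     'contact': [0, 1, 2],
--     'message': [3],
--     'comment': [3],
--     'password': [4],
--     'login': [4],
--     'signup': [4],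
-- }
--
--
-- def generate_form_fields(prompt):
--     """Generate form fields based on prompt"""
--     prompt_lower = prompt.lower()
--     triggered = set()
--     for keyword, indices in KEYWORD_FIELDS.items():
--         if keyword in prompt_lower:
--             triggered.update(indices)
--     if not triggered:
--         triggered = {0, 1}
--     return ''.join(SNIPPETS[i] for i in sorted(triggered))
-- ===== Notes on version B (the rewrite author's own statement) =====
-- stated objective: alternative
-- what changed: Replaced A's five per-field if/append branches (each with an inner any over its keyword list) by an inverted keyword->field-indices index: one pass over the keywords accumulates a set of triggered field indices ('contact' marks three at once), and the output is the snippets at the sorted indices.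
import Mathlib
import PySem

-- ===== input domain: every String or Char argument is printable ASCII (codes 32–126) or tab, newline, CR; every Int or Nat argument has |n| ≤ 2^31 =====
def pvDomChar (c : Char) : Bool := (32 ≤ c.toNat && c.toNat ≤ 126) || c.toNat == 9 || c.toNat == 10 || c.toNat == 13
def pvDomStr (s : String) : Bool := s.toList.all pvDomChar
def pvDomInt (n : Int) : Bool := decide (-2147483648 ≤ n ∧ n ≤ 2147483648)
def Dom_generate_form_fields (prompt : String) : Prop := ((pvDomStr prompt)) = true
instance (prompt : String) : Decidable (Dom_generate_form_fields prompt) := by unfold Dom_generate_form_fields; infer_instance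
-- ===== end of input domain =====

-- B replaces A's five per-field keyword checks by an inverted keyword -> field-index map
-- feeding a set of triggered indices that is sorted to pick the snippets; proved equal to A everywhere.

-- ===== PORT A =====
-- the five HTML snippet literals of A (named constants; same strings)
def htmlName : String := "\n        <div class=\"form-group\">\n            <label for=\"name\">Name:</label>\n            <input type=\"text\" id=\"name\" name=\"name\" required>\n        </div>"
def htmlEmail : String := "\n        <div class=\"form-group\">\n            <label for=\"email\">Email:</label>\n            <input type=\"email\" id=\"email\" name=\"email\" required>\n        </div>"
def htmlPhone : String := "\n        <div class=\"form-group\">\n            <label for=\"phone\">Phone:</label>\n            <input type=\"tel\" id=\"phone\" name=\"phone\">\n        </div>"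
def htmlMessage : String := "\n        <div class=\"form-group\">\n            <label for=\"message\">Message:</label>\n            <textarea id=\"message\" name=\"message\" rows=\"4\"></textarea>\n        </div>"
def htmlPassword : String := "\n        <div class=\"form-group\">\n            <label for=\"password\">Password:</label>\n            <input type=\"password\" id=\"password\" name=\"password\" required>\n        </div>"

def generate_form_fields (prompt : String) : String :=
  let fields : List String := []
  let prompt_lower := PySem.Str.lower prompt
  let fields := if ["name", "contact"].any (fun w => PySem.Str.isIn w prompt_lower)
    then fields ++ [htmlName] else fields
  let fields := if ["email", "contact"].any (fun w => PySem.Str.isIn w prompt_lower)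
    then fields ++ [htmlEmail] else fields
  let fields := if ["phone", "contact"].any (fun w => PySem.Str.isIn w prompt_lower)
    then fields ++ [htmlPhone] else fields
  let fields := if ["message", "comment"].any (fun w => PySem.Str.isIn w prompt_lower)
    then fields ++ [htmlMessage] else fields
  let fields := if ["password", "login", "signup"].any (fun w => PySem.Str.isIn w prompt_lower)
    then fields ++ [htmlPassword] else fields
  let fields := if fields.isEmpty then [htmlName, htmlEmail] else fields
  PySem.Str.join "" fields

-- ===== PORT B =====
def snippets : List String := [htmlName, htmlEmail, htmlPhone, htmlMessage, htmlPassword]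

-- inverted index: keyword -> indices of the snippets it triggers (Python dict, insertion order)
def keywordFields : List (String × List Int) :=
  [ ("name", [0]), ("email", [1]), ("phone", [2]), ("contact", [0, 1, 2])
  , ("message", [3]), ("comment", [3])
  , ("password", [4]), ("login", [4]), ("signup", [4]) ]

def generate_form_fields_alt (prompt : String) : String :=
  let prompt_lower := PySem.Str.lower prompt
  let triggered : PySem.Set Int := keywordFields.foldl
    (fun acc kv => if PySem.Str.isIn kv.1 prompt_lower then PySem.Set.update acc kv.2 else acc)
    PySem.Set.empty
  let triggered := if PySem.Set.len triggered == 0 then PySem.Set.ofList [0, 1] else triggered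
  -- SNIPPETS[i] for i in sorted(triggered): i is always 0..4 here, so pyGetD is exact
  PySem.Str.join "" ((PySem.List.sorted triggered (fun i => i) false).map
    (fun i => PySem.List.pyGetD snippets i ""))

-- ===== PRECONDITION & SPEC =====
def Spec_generate_form_fields (prompt : String) (out : String) : Prop := out = generate_form_fields_alt prompt
instance (prompt : String) (out : String) : Decidable (Spec_generate_form_fields prompt out) := by unfold Spec_generate_form_fields; infer_instance

-- ===== CLAIM =====
def Claim_equal_generate_form_fields : Prop := ∀ (prompt : String), Dom_generate_form_fields prompt → Spec_generate_form_fields prompt (generate_form_fields prompt)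

-- ===== LEMMAS AND PROOFS =====
-- A's final field list, with the snippet strings abstracted and each branch condition a Bool
def aFields (n e p m w : String) (b1 b2 b3 b4 b5 : Bool) : List String :=
  let fields : List String := []
  let fields := if b1 then fields ++ [n] else fields
  let fields := if b2 then fields ++ [e] else fields
  let fields := if b3 then fields ++ [p] else fields
  let fields := if b4 then fields ++ [m] else fields
  let fields := if b5 then fields ++ [w] else fields
  if fields.isEmpty then [n, e] else fields

-- B's field list with the keyword fold unrolled over the literal keywordFields table
def bFields (n e p m w : String) (k1 k2 k3 k4 k5 k6 k7 k8 k9 : Bool) : List String :=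
  let s : PySem.Set Int := PySem.Set.empty
  let s := if k1 then PySem.Set.update s [0] else s
  let s := if k2 then PySem.Set.update s [1] else s
  let s := if k3 then PySem.Set.update s [2] else s
  let s := if k4 then PySem.Set.update s [0, 1, 2] else s
  let s := if k5 then PySem.Set.update s [3] else s
  let s := if k6 then PySem.Set.update s [3] else s
  let s := if k7 then PySem.Set.update s [4] else s
  let s := if k8 then PySem.Set.update s [4] else s
  let s := if k9 then PySem.Set.update s [4] else s
  let s := if PySem.Set.len s == 0 then PySem.Set.ofList [0, 1] else s
  (PySem.List.sorted s (fun i => i) false).map (fun i => PySem.List.pyGetD [n, e, p, m, w] i "")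

set_option maxRecDepth 10000 in
theorem core_eq (n e p m w : String) (k1 k2 k3 k4 k5 k6 k7 k8 k9 : Bool) :
    aFields n e p m w (k1 || (k4 || false)) (k2 || (k4 || false)) (k3 || (k4 || false))
      (k5 || (k6 || false)) (k7 || (k8 || (k9 || false)))
      = bFields n e p m w k1 k2 k3 k4 k5 k6 k7 k8 k9 := by
  cases k1 <;> cases k2 <;> cases k3 <;> cases k4 <;> cases k5 <;> cases k6 <;>
    cases k7 <;> cases k8 <;> cases k9 <;> rfl

-- ===== VERDICT =====
theorem generate_form_fields_spec : Claim_equal_generate_form_fields := by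
  intro prompt _
  unfold Spec_generate_form_fields
  exact congrArg (PySem.Str.join "")
    (core_eq htmlName htmlEmail htmlPhone htmlMessage htmlPassword
      (PySem.Str.isIn "name" (PySem.Str.lower prompt))
      (PySem.Str.isIn "email" (PySem.Str.lower prompt))
      (PySem.Str.isIn "phone" (PySem.Str.lower prompt))
      (PySem.Str.isIn "contact" (PySem.Str.lower prompt))
      (PySem.Str.isIn "message" (PySem.Str.lower prompt))
      (PySem.Str.isIn "comment" (PySem.Str.lower prompt))
      (PySem.Str.isIn "password" (PySem.Str.lower prompt))
      (PySem.Str.isIn "login" (PySem.Str.lower prompt))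
      (PySem.Str.isIn "signup" (PySem.Str.lower prompt)))
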